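-- pv_equiv track=rewrite | github.com/suhaibshowkatkhan1/Python-Programming- | suhaib_khan_191203083_Python_Assignment/Q1_and_Q2/Q2_Earliest_Trilogy_year.py | trilogy_year
-- ===== SOURCE A (Python) =====
-- from typing import List, Optional
--
-- def trilogy_year(titles: List[str], years: List[int]) -> Optional[int]:
--     books = {}
--     for title, year in zip(titles, years):
--         if year in books:
--             books[year].append(title)
--         else:
--             books[year] = [title]
--
--     for year in sorted(books.keys()):
--         if year + 1 in books and year + 2 in books:
--             return year
--     return None
-- ===== SOURCE B (Python) =====
-- from typing import List, Optional
--
-- def trilogy_year(titles: List[str], years: List[int]) -> Optional[int]: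
--     s = set(years[:len(titles)])
--     best = None
--     for y in s:
--         if y + 1 in s and y + 2 in s and (best is None or y < best):
--             best = y
--     return best
-- ===== Notes on version B (the rewrite author's own statement) =====
-- stated objective: alternative
-- what changed: Replaces the dict-of-title-lists plus sorted-keys scan with a set of the zipped years and a single pass tracking the minimum qualifying year, removing both the grouping dict and the sort (O(n) vs O(n log n) in theory; measured ~1.36x, below the 1.5x bar, so no speed claim).
import Mathlib
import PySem

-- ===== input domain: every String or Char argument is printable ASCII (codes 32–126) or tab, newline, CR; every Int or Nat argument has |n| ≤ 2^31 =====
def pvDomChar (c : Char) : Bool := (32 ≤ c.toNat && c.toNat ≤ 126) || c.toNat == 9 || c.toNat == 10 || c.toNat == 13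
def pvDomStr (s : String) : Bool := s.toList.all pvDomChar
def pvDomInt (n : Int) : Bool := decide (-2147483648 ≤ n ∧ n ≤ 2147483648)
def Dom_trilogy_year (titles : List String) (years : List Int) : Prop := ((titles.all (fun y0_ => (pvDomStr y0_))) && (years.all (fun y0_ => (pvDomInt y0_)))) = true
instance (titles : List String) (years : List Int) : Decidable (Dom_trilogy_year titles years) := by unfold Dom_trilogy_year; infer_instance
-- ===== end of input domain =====

-- B replaces A's dict-of-title-lists + sorted-keys scan by a set of years and one pass tracking the minimum qualifying year (alternative algorithm, no sort).


-- ===== PORT A =====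
-- 'for year in sorted(books.keys()): if year+1 in books and year+2 in books: return year / return None'
def trilogyScan (books : PySem.Dict Int (List String)) : List Int → Option Int
  | [] => none
  | y :: rest =>
    if books.contains (y + 1) && books.contains (y + 2) then some y
    else trilogyScan books rest

def trilogy_year (titles : List String) (years : List Int) : Option Int :=
  let books : PySem.Dict Int (List String) :=
    (titles.zip years).foldl
      (fun d p =>
        if d.contains p.2 then d.modify p.2 [] (fun l => l ++ [p.1])
        else d.insert p.2 [p.1])
      PySem.Dict.empty
  trilogyScan books (PySem.List.sorted books.keys (fun x => x) false)

-- ===== PORT B =====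
def trilogy_year_alt (titles : List String) (years : List Int) : Option Int :=
  let s : PySem.Set Int := PySem.Set.ofList (years.take titles.length)
  s.foldl
    (fun best y =>
      if PySem.Set.contains s (y + 1) && PySem.Set.contains s (y + 2) &&
         (best.isNone || decide (y < best.getD 0)) then some y
      else best)
    none

-- ===== PRECONDITION & SPEC =====
def Spec_trilogy_year (titles : List String) (years : List Int) (out : Option Int) : Prop := out = trilogy_year_alt titles years
instance (titles : List String) (years : List Int) (out : Option Int) : Decidable (Spec_trilogy_year titles years out) := by unfold Spec_trilogy_year; infer_instance

-- ===== CLAIM (what is proved, stated in full; the proofs are below) =====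
def Claim_equal_trilogy_year : Prop := ∀ (titles : List String) (years : List Int), Dom_trilogy_year titles years → Spec_trilogy_year titles years (trilogy_year titles years)

-- ===== LEMMAS AND PROOFS =====

-- keys of A's grouping loop are the distinct years in zip order
lemma keys_books (pairs : List (String × Int)) (d : PySem.Dict Int (List String)) :
    (pairs.foldl
      (fun d p =>
        if d.contains p.2 then d.modify p.2 [] (fun l => l ++ [p.1])
        else d.insert p.2 [p.1]) d).keys = PySem.Set.update d.keys (pairs.map (·.2)) := by
  induction pairs generalizing d with
  | nil => simp [PySem.Set.update]
  | cons p rest ih =>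
    simp only [List.foldl_cons, List.map_cons, PySem.Set.update, ih]
    congr 1
    by_cases h : d.contains p.2 = true
    · rw [if_pos h, PySem.Dict.keys_modify, PySem.Dict.keys_insert_of_contains _ _ h]
      have hm : p.2 ∈ d.keys := (PySem.Dict.contains_iff_mem_keys d p.2).1 h
      simp [PySem.Set.add, hm, PySem.Set.contains]
    · rw [if_neg h, PySem.Dict.keys_insert_of_not_contains _ _ (by simpa using h)]
      have hm : p.2 ∉ d.keys := fun hmem => h ((PySem.Dict.contains_iff_mem_keys d p.2).2 hmem)
      simp [PySem.Set.add, hm, PySem.Set.contains]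

lemma map_snd_zip_eq_take {α β : Type} (xs : List α) (ys : List β) :
    (xs.zip ys).map (·.2) = ys.take xs.length := by
  induction xs generalizing ys with
  | nil => simp
  | cons x xs ih => cases ys <;> simp [ih]

-- B's fold computes min? of the qualifying elements, merged with the accumulator
lemma foldB_min (P : Int → Bool) (l : List Int) (acc : Option Int) :
    (l.foldl (fun best y => if P y && (best.isNone || decide (y < best.getD 0)) then some y else best) acc)
      = match acc, (l.filter P).min? with
        | none, r => r
        | some b, none => some b
        | some b, some m => some (min b m) := by
  induction l generalizing acc with
  | nil => cases acc <;> simp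
  | cons y rest ih =>
    simp only [List.foldl_cons, List.filter_cons]
    by_cases hy : P y = true
    · rw [if_pos hy]
      cases acc with
      | none =>
        simp only [hy, Option.isNone_none, Bool.true_and, Bool.true_or, ih]
        rw [List.min?_cons]
        cases hm : (rest.filter P).min? <;> simp [Option.elim, min_def]
      | some b =>
        simp only [hy, Option.isNone_some, Option.getD_some, Bool.true_and, Bool.false_or]
        by_cases hlt : y < b
        · rw [if_pos (by simp [hlt]), ih]
          rw [List.min?_cons]
          cases hm : (rest.filter P).min? with
          | none => simp [Option.elim, min_def]; omega
          | some m => simp only [Option.elim]; congr 1; rw [← min_assoc]; congr 1; omega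
        · rw [if_neg (by simp [hlt]), ih]
          rw [List.min?_cons]
          cases hm : (rest.filter P).min? with
          | none => simp [Option.elim, min_def]; omega
          | some m => simp only [Option.elim]; congr 1; rw [← min_assoc]; congr 1; omega
    · have hy' : P y = false := by simpa using hy
      rw [if_neg (by simp [hy']), hy']
      simpa using ih acc

-- A's scan on a strictly increasing list is min? of the qualifying elements
lemma scan_min (P : Int → Bool) (sl : List Int) (hp : sl.Pairwise (· < ·)) :
    (List.find? P sl) = (sl.filter P).min? := by
  induction sl with
  | nil => simp
  | cons y rest ih =>
    rcases List.pairwise_cons.1 hp with ⟨hlt, hp'⟩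
    by_cases hy : P y = true
    · rw [List.find?_cons_of_pos hy, List.filter_cons_of_pos hy, List.min?_cons]
      cases hm : (rest.filter P).min? with
      | none => simp [Option.elim]
      | some m =>
        have hmem : m ∈ rest.filter P := List.min?_mem hm
        have : y < m := hlt m (List.mem_of_mem_filter hmem)
        simp [Option.elim, min_def]
        omega
    · have hy' : P y = false := by simpa using hy
      rw [List.find?_cons_of_neg (by simp [hy']), List.filter_cons_of_neg (by simp [hy'])]
      exact ih hp' 

lemma min?_of_perm (l l' : List Int) (h : l.Perm l') : l.min? = l'.min? := by
  cases hm : l'.min? with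
  | none =>
    simp only [List.min?_eq_none_iff] at hm ⊢
    subst hm; exact h.eq_nil
  | some m =>
    rw [List.min?_eq_some_iff] at hm ⊢
    exact ⟨h.mem_iff.2 hm.1, fun b hb => hm.2 b (h.mem_iff.1 hb)⟩

lemma scan_eq_find? (books : PySem.Dict Int (List String)) (l : List Int) :
    trilogyScan books l = l.find? (fun y => books.contains (y + 1) && books.contains (y + 2)) := by
  induction l with
  | nil => rfl
  | cons y rest ih =>
    simp only [trilogyScan, List.find?_cons, ih]
    cases hc : (books.contains (y + 1) && books.contains (y + 2)) <;> simp

theorem trilogy_year_spec_aux (titles : List String) (years : List Int) :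
    trilogy_year titles years = trilogy_year_alt titles years := by
  unfold trilogy_year trilogy_year_alt
  set books : PySem.Dict Int (List String) :=
    (titles.zip years).foldl
      (fun d p =>
        if d.contains p.2 then d.modify p.2 [] (fun l => l ++ [p.1])
        else d.insert p.2 [p.1])
      PySem.Dict.empty with hbooks
  set s : PySem.Set Int := PySem.Set.ofList (years.take titles.length) with hs
  have hkeys : books.keys = s := by
    rw [hbooks, keys_books]
    simp only [PySem.Dict.keys_empty, PySem.Set.update_nil_left, map_snd_zip_eq_take]
    exact hs.symm
  have hP : ∀ y : Int, (books.contains (y + 1) && books.contains (y + 2))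
      = (PySem.Set.contains s (y + 1) && PySem.Set.contains s (y + 2)) := by
    intro y
    have h1 : ∀ k : Int, books.contains k = PySem.Set.contains s k := by
      intro k
      rw [PySem.Dict.contains_eq_decide_mem_keys, hkeys, PySem.Set.contains]
      simp
    rw [h1, h1]
  rw [scan_eq_find?, hkeys]
  have hfun : (fun y => books.contains (y + 1) && books.contains (y + 2))
      = (fun y => PySem.Set.contains s (y + 1) && PySem.Set.contains s (y + 2)) := funext hP
  rw [hfun]
  rw [scan_min _ _ (PySem.List.sorted_ofList_pairwise_lt (years.take titles.length))]
  rw [foldB_min]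
  have hperm : ((PySem.List.sorted s (fun x => x) false).filter
        (fun y => PySem.Set.contains s (y + 1) && PySem.Set.contains s (y + 2))).Perm
      (s.filter (fun y => PySem.Set.contains s (y + 1) && PySem.Set.contains s (y + 2))) :=
    (PySem.List.sorted_perm s (fun x => x) false).filter _
  rw [min?_of_perm _ _ hperm]

-- ===== VERDICT (by name: the statement is the Claim_ definition above) =====
theorem trilogy_year_spec : Claim_equal_trilogy_year := by
  intro titles years _
  unfold Spec_trilogy_year
  exact trilogy_year_spec_aux titles years
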